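-- pv_equiv track=rewrite | github.com/codesquad-backend-study/daily-algorithm-challenge | Sully/baekjoon/B10816.py | solution
-- ===== SOURCE A (Python) =====
-- import collections
-- from typing import List
--
-- def solution(sang_cards: List[int], cards: List[int]) -> List[int]:
--     answer = []
--
--     sang_card_map = collections.defaultdict(int)
--     for card in sang_cards:
--         sang_card_map[card] += 1
--
--     for card in cards:
--         answer.append(sang_card_map[card])
--
--     return answer
-- ===== SOURCE B (Python) =====
-- from typing import List
--
--
-- def _bisect_left(a, x):
--     lo, hi = 0, len(a)
--     while lo < hi:
--         mid = (lo + hi) // 2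
--         if a[mid] < x:
--             lo = mid + 1
--         else:
--             hi = mid
--     return lo
--
--
-- def _bisect_right(a, x):
--     lo, hi = 0, len(a)
--     while lo < hi:
--         mid = (lo + hi) // 2
--         if x < a[mid]:
--             hi = mid
--         else:
--             lo = mid + 1
--     return lo
--
--
-- def solution(sang_cards: List[int], cards: List[int]) -> List[int]:
--     sorted_cards = sorted(sang_cards)
--     return [_bisect_right(sorted_cards, card) - _bisect_left(sorted_cards, card)
--             for card in cards]
-- ===== Notes on version B (the rewrite author's own statement) =====
-- stated objective: alternative
-- what changed: Replaces the defaultdict counting pass and O(1) lookups with a sorted copy of sang_cards queried by two hand-written binary searches (bisect_right - bisect_left) per card.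
import Mathlib
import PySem

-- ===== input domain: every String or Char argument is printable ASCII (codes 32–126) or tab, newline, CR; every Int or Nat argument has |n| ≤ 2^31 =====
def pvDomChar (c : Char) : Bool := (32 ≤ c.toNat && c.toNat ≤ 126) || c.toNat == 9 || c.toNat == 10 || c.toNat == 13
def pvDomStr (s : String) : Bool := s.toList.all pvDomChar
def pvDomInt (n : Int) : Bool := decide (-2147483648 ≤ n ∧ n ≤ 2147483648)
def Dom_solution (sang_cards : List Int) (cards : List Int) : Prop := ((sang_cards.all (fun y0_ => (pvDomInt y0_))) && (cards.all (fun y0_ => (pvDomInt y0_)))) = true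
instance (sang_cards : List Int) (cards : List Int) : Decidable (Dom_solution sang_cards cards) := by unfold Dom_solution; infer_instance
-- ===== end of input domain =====

-- B replaces A's defaultdict counting map with a sorted copy of sang_cards queried by two
-- binary searches per card (bisect_right - bisect_left); alternative algorithm, same results.

-- ===== PORT A =====
def solution (sang_cards : List Int) (cards : List Int) : List Int :=
  let sang_card_map := sang_cards.foldl (fun d card => d.modify card 0 (· + 1)) (PySem.Dict.empty)
  cards.foldl (fun answer card => answer ++ [sang_card_map.getD card 0]) []

-- ===== PORT B =====
-- Source B's _bisect_left/_bisect_right are the standard lo/hi binary-search loops, which are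
-- exactly PySem.List.bisectLeft / bisectRight (same loop: mid = (lo+hi)//2, compare, recurse).
def solution_alt (sang_cards : List Int) (cards : List Int) : List Int :=
  let sorted_cards := PySem.List.sorted sang_cards (fun x => x) false
  cards.map (fun card =>
    ((PySem.List.bisectRight sorted_cards card : Int) - (PySem.List.bisectLeft sorted_cards card : Int)))

-- ===== PRECONDITION & SPEC =====
def Spec_solution (sang_cards : List Int) (cards : List Int) (out : List Int) : Prop := out = solution_alt sang_cards cards
instance (sang_cards : List Int) (cards : List Int) (out : List Int) : Decidable (Spec_solution sang_cards cards out) := by unfold Spec_solution; infer_instance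

-- ===== CLAIM (what is proved, stated in full; the proofs are below) =====
def Claim_equal_solution : Prop := ∀ (sang_cards : List Int) (cards : List Int), Dom_solution sang_cards cards → Spec_solution sang_cards cards (solution sang_cards cards)

-- ===== LEMMAS AND PROOFS =====

-- countP (· ≤ c) splits into countP (· < c) plus the exact-match count, on ANY list
theorem pv_countP_le_split (c : Int) (s : List Int) :
    s.countP (fun x => decide (x ≤ c)) = s.countP (fun x => decide (x < c)) + s.count c := by
  induction s with
  | nil => simp
  | cons a t ih =>
    rcases lt_trichotomy a c with h | h | h
    · simp only [List.countP_cons, List.count_cons, ih]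
      simp [le_of_lt h, h, ne_of_lt h]; omega
    · simp only [List.countP_cons, List.count_cons, ih]
      simp [le_of_eq h, not_lt.2 (le_of_eq h.symm), h]; omega
    · simp only [List.countP_cons, List.count_cons, ih]
      simp [not_le.2 h, not_lt.2 (le_of_lt h), ne_of_gt h]

-- a predicate that holds exactly on the first L positions has countP = L
theorem pv_countP_eq_of_prefix (p : Int → Bool) :
    ∀ (s : List Int) (L : Nat), L ≤ s.length →
      (∀ (j : Nat) (hj : j < s.length), p s[j] = decide (j < L)) → s.countP p = L := by
  intro s
  induction s with
  | nil => intro L hL _; simpa using (Nat.le_zero.mp hL).symm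
  | cons a t ih =>
    intro L hL h
    have h0 : p a = decide (0 < L) := by simpa using h 0 (by simp)
    cases L with
    | zero =>
      have : t.countP p = 0 := ih 0 (Nat.zero_le _) (fun j hj => by
        have := h (j + 1) (by simpa using Nat.succ_lt_succ hj); simpa using this)
      simp [h0, this]
    | succ L' =>
      have ht : t.countP p = L' := ih L' (by simpa using Nat.succ_le_succ_iff.mp hL)
        (fun j hj => by
          have := h (j + 1) (by simpa using Nat.succ_lt_succ hj)
          simpa [Nat.succ_lt_succ_iff] using this)
      simp [h0, ht]

theorem pv_bisectLeft_eq_countP (s : List Int) (c : Int)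
    (hs : s.Pairwise (fun a b => a ≤ b)) :
    PySem.List.bisectLeft s c = s.countP (fun x => decide (x < c)) := by
  obtain ⟨hle, hlt, hge⟩ := PySem.List.bisectLeft_spec s c hs
  exact (pv_countP_eq_of_prefix _ s _ hle (fun j hj => by
    by_cases hj2 : j < PySem.List.bisectLeft s c
    · simp [hj2, hlt j hj hj2]
    · simp [hj2, not_lt.2 (hge j hj (not_lt.1 hj2))])).symm

theorem pv_bisectRight_eq_countP (s : List Int) (c : Int)
    (hs : s.Pairwise (fun a b => a ≤ b)) :
    PySem.List.bisectRight s c = s.countP (fun x => decide (x ≤ c)) := by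
  obtain ⟨hle, hlt, hge⟩ := PySem.List.bisectRight_spec s c hs
  exact (pv_countP_eq_of_prefix _ s _ hle (fun j hj => by
    by_cases hj2 : j < PySem.List.bisectRight s c
    · simp [hj2, hlt j hj hj2]
    · simp [hj2, not_le.2 (hge j hj (not_lt.1 hj2))])).symm

-- the per-card value B computes is the multiplicity of the card in sang_cards
theorem pv_bisect_diff_eq_count (sang_cards : List Int) (c : Int) :
    ((PySem.List.bisectRight (PySem.List.sorted sang_cards (fun x => x) false) c : Int)
      - (PySem.List.bisectLeft (PySem.List.sorted sang_cards (fun x => x) false) c : Int))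
      = (sang_cards.count c : Int) := by
  set s := PySem.List.sorted sang_cards (fun x => x) false with hsdef
  have hs : s.Pairwise (fun a b => a ≤ b) := by
    simpa using PySem.List.sorted_pairwise sang_cards (fun x => x)
  have hperm : s.Perm sang_cards := PySem.List.sorted_perm sang_cards (fun x => x) false
  have hcount : s.count c = sang_cards.count c := hperm.count_eq c
  have h1 := pv_bisectLeft_eq_countP s c hs
  have h2 := pv_bisectRight_eq_countP s c hs
  have h3 := pv_countP_le_split c s
  omega

-- ===== VERDICT (by name: the statement is the Claim_ definition above) =====
theorem solution_spec : Claim_equal_solution := by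
  intro sang_cards cards _
  unfold Spec_solution solution solution_alt
  rw [PySem.List.foldl_append_singleton_eq_map]
  simp only [List.nil_append]
  refine List.map_congr_left (fun c _ => ?_)
  rw [pv_bisect_diff_eq_count]
  simpa using PySem.Dict.getD_foldl_modify_add_one sang_cards PySem.Dict.empty c
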